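-- pv_equiv track=rewrite | github.com/Vicktoria13/Detection-And-Matching | utils_tp.py | nb_un_successifs
-- ===== SOURCE A (Python) =====
-- def nb_un_successifs(V):
--     score_depart = 0   # Sauvegarde du score du début du vecteur
--     init_score_depart = False
--
--     score = 0           # Score courant
--     meilleur = 0        # Meilleur score
--
--     for e in V :
--         if (e == 1) : score += 1        # On ajoute 1 à chaque 1 successif
--         else :                          # Sinon, on vérifie le record et on retombe à 0
--             # Vérification du record
--             if (score > meilleur) : meilleur = score
--
--             # Sauvegarde du premier score
--             if (init_score_depart == False) :
--                 score_depart = score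
--                 init_score_depart = True
--
--             # Remise à zéro
--             score = 0
--
--     # Vérification si le score en fin de vecteur et celui en début sont au-dessus du record
--     if ((score+score_depart) > meilleur) : meilleur = (score+score_depart)
--
--     return meilleur
-- ===== SOURCE B (Python) =====
-- def nb_un_successifs(V):
--     # Doubled-sequence scan: longest run of 1s in V+V, capped at len(V), handles the wrap.
--     L = list(V)
--     best = cur = 0
--     for e in L + L:
--         if e == 1:
--             cur += 1
--         else:
--             cur = 0
--         if cur > best:
--             best = cur
--     return min(best, len(L))
-- ===== Notes on version B (the rewrite author's own statement) =====
-- stated objective: simpler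
-- what changed: Replaces A's leading/trailing-run bookkeeping (saved start score, init flag, end-of-loop wrap check) with a single max-run counter over the doubled list V+V, capped at len(V).
import Mathlib
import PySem

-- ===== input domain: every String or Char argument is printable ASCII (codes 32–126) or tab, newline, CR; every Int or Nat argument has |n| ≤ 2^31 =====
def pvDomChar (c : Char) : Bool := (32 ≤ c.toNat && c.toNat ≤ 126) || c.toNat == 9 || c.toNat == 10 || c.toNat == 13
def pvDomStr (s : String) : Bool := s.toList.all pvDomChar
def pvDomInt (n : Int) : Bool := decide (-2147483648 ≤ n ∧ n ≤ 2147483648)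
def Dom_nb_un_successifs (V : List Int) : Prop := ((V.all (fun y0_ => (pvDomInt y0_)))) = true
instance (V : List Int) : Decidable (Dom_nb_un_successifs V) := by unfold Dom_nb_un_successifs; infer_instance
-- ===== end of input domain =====

-- B replaces A's start-run/end-run bookkeeping by one max-run scan of the doubled list V+V capped at len(V); same O(n) cost, plainer code.


-- ===== PORT A =====
-- loop body of A: state (score_depart, init_score_depart, score, meilleur)
def pvStepA (st : Int × Bool × Int × Int) (e : Int) : Int × Bool × Int × Int :=
  let (sd, init, sc, m) := st
  if e = 1 then (sd, init, sc + 1, m)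
  else
    let m' := if sc > m then sc else m
    let sd' := if init = false then sc else sd
    (sd', true, 0, m')

def nb_un_successifs (V : List Int) : Int :=
  let st := V.foldl pvStepA (0, false, 0, 0)
  let sd := st.1; let sc := st.2.2.1; let m := st.2.2.2
  if sc + sd > m then sc + sd else m

-- ===== PORT B =====
-- loop body of B: state (cur, best)
def pvStepB (st : Int × Int) (e : Int) : Int × Int :=
  let cur := if e = 1 then st.1 + 1 else 0
  let best := if cur > st.2 then cur else st.2
  (cur, best)

def nb_un_successifs_alt (V : List Int) : Int :=
  let p := (V ++ V).foldl pvStepB (0, 0)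
  min p.2 (V.length : Int)

-- ===== PRECONDITION & SPEC =====
def Spec_nb_un_successifs (V : List Int) (out : Int) : Prop := out = nb_un_successifs_alt V
instance (V : List Int) (out : Int) : Decidable (Spec_nb_un_successifs V out) := by unfold Spec_nb_un_successifs; infer_instance

-- ===== CLAIM (what is proved, stated in full; the proofs are below) =====
def Claim_equal_nb_un_successifs : Prop := ∀ (V : List Int), Dom_nb_un_successifs V → Spec_nb_un_successifs V (nb_un_successifs V)

-- ===== LEMMAS AND PROOFS =====

-- Invariants of A's loop state, folded from the initial state.
lemma foldA_inv (V : List Int) :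
    ∀ sd init sc m, V.foldl pvStepA (0, false, 0, 0) = (sd, init, sc, m) →
      0 ≤ sd ∧ 0 ≤ sc ∧ 0 ≤ m ∧ m ≤ V.length ∧ sd + sc ≤ V.length ∧
      (init = false → sd = 0 ∧ m = 0 ∧ sc = V.length) := by
  induction V using List.reverseRecOn with
  | nil =>
    intro sd init sc m h
    simp only [List.foldl_nil, Prod.mk.injEq] at h
    obtain ⟨h1, h2, h3, h4⟩ := h
    subst h1; subst h2; subst h3; subst h4; simp
  | append_singleton V e ih =>
    intro sd init sc m h
    rw [List.foldl_append, List.foldl_cons, List.foldl_nil] at h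
    rcases hV : V.foldl pvStepA (0, false, 0, 0) with ⟨sd0, init0, sc0, m0⟩
    rw [hV] at h
    have hi := ih sd0 init0 sc0 m0 hV
    simp only [pvStepA] at h
    simp only [List.length_append, List.length_cons, List.length_nil]
    cases init0 <;> by_cases he : e = 1 <;>
      simp only [he, if_true, if_false, Prod.mk.injEq] at h <;>
      obtain ⟨h1, h2, h3, h4⟩ := h <;> subst h1 <;> subst h2 <;> subst h3 <;> subst h4 <;>
      simp_all <;> (try split_ifs) <;> omega

-- Characterisation of B's scan in terms of A's fold.
lemma foldB_char (V : List Int) :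
    ∀ sd init sc m c b, 0 ≤ c → c ≤ b →
      V.foldl pvStepA (0, false, 0, 0) = (sd, init, sc, m) →
      V.foldl pvStepB (c, b) =
        (if init then sc else c + sc,
         if init then max b (max (c + sd) (max m sc)) else max b (c + sc)) := by
  induction V using List.reverseRecOn with
  | nil =>
    intro sd init sc m c b hc hcb h
    simp only [List.foldl_nil, Prod.mk.injEq] at h ⊢
    obtain ⟨h1, h2, h3, h4⟩ := h
    subst h1; subst h2; subst h3; subst h4
    simp only [Bool.false_eq_true, if_false]
    constructor
    · omega
    · omega
  | append_singleton V e ih =>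
    intro sd init sc m c b hc hcb h
    rw [List.foldl_append, List.foldl_cons, List.foldl_nil] at h ⊢
    rcases hV : V.foldl pvStepA (0, false, 0, 0) with ⟨sd0, init0, sc0, m0⟩
    rw [hV] at h
    have hi := foldA_inv V sd0 init0 sc0 m0 hV
    rw [ih sd0 init0 sc0 m0 c b hc hcb hV]
    simp only [pvStepA, pvStepB, Prod.mk.injEq] at h ⊢
    cases init0 <;> by_cases he : e = 1 <;>
      simp only [he, if_true, if_false, Prod.mk.injEq] at h ⊢ <;>
      obtain ⟨h1, h2, h3, h4⟩ := h <;> subst h1 <;> subst h2 <;> subst h3 <;> subst h4 <;>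
      simp_all <;> (try split_ifs) <;> omega

-- ===== VERDICT (by name: the statement is the Claim_ definition above) =====
theorem nb_un_successifs_spec : Claim_equal_nb_un_successifs := by
  intro V _
  unfold Spec_nb_un_successifs nb_un_successifs nb_un_successifs_alt
  rcases hV : V.foldl pvStepA (0, false, 0, 0) with ⟨sd, init, sc, m⟩
  have hi := foldA_inv V sd init sc m hV
  rw [List.foldl_append]
  rw [foldB_char V sd init sc m 0 0 le_rfl le_rfl hV]
  cases init
  · simp only [Bool.false_eq_true, ite_false]
    obtain ⟨_, _, _, _, _, hf⟩ := hi
    obtain ⟨e1, e2, e3⟩ := hf rfl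
    rw [foldB_char V sd false sc m (0 + sc) (max 0 (0 + sc)) (by omega) (by omega) hV]
    simp only [Bool.false_eq_true, ite_false]
    split_ifs <;> omega
  · simp only [ite_true]
    obtain ⟨hsd, hsc, hm, hmL, hsdsc, _⟩ := hi
    rw [foldB_char V sd true sc m sc (max 0 (max (0 + sd) (max m sc))) (by omega) (by omega) hV]
    simp only [ite_true]
    split_ifs <;> omega
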